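-- pv_equiv track=rewrite | github.com/alfredovargasjr/CECS_229_Discrete_Structures | Labs/Lab Practice/CECS_229 - gcd_lcd.py | factors_List
-- ===== SOURCE A (Python) =====
-- def factors_List(n):
--     i = 2
--     reps = 0
--     facts = []
--     while n > 1 :
--         if n % i == 0:
--             reps = reps + 1
--             n = int(n / i)
--         else:
--             facts.append(reps)
--             reps = 0
--             i = i + 1
--     facts.append(reps)
--     return facts
-- ===== SOURCE B (Python) =====
-- def factors_List(n):
--     if n <= 1:
--         return [0]
--     s = 2
--     while n % s:
--         s += 1
--     e = 0
--     while n % s == 0: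
--         e += 1
--         n = int(n / s)
--     if n == 1:
--         return [0] * (s - 2) + [e]
--     rest = factors_List(n)
--     rest[s - 2] = e
--     return rest
-- ===== Notes on version B (the rewrite author's own statement) =====
-- stated objective: alternative
-- what changed: B is recursive on the prime structure instead of A's single iterative loop: it finds the smallest prime factor s, strips its full exponent e, recurses on the remaining cofactor, and assembles the answer back-to-front by writing e at index s-2 of the recursive result (or padding with zeros at the base case), whereas A threads a reps/facts accumulator forward through one interleaved while loop.
import Mathlib
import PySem

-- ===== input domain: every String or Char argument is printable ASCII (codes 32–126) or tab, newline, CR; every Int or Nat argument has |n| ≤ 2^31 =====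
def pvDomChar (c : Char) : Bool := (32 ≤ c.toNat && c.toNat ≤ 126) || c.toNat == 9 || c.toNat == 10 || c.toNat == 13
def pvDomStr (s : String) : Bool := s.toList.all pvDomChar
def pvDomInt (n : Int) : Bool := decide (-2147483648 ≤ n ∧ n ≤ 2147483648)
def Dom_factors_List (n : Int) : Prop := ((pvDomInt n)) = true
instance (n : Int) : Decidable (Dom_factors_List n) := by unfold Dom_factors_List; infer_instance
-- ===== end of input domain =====

-- B replaces A's single forward loop by a recursion on the prime structure (strip the smallest
-- prime factor, recurse on the cofactor, write its exponent into the recursive result);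
-- return values agree on every input (alternative decomposition, no speed claim).

-- ===== PORT A =====
-- A's while loop; the divisor i (which starts at 2 and only increases) is represented as j+2,
-- so 'n % i' is Nat mod on positive operands, exactly Python's, and 'int(n / i)' on an exact
-- multiple of i with |n| ≤ 2^31 is exactly n / (j+2). The final 'else' arm is a totality
-- guard only: in every state reachable from the initial call, i < n whenever the loop body
-- runs with n % i ≠ 0 (proved as noSmallFac_lt below).
def factorsLoopA (n j : Nat) (reps : Int) (facts : List Int) : List Int :=
  if n ≤ 1 then facts ++ [reps]
  else if n % (j+2) = 0 then factorsLoopA (n / (j+2)) j (reps+1) facts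
  else if j + 2 < n then factorsLoopA n (j+1) 0 (facts ++ [reps])
  else facts ++ [reps]
termination_by (n, n - (j+2))
decreasing_by
  · exact Prod.Lex.left _ _ (Nat.div_lt_self (by omega) (by omega))
  · exact Prod.Lex.right _ (by omega)

def factors_List (n : Int) : List Int := factorsLoopA n.toNat 0 0 []

-- ===== PORT B =====
-- 'while n % s: s += 1' of Source B; the 'n ≤ s' disjunct is a totality guard only: for n ≥ 2
-- (the only states Source B reaches) the scan stops at a divisor s ≤ n, where both guards agree.
def findS (n s : Nat) : Nat :=
  if n % s = 0 ∨ n ≤ s then s else findS n (s+1)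
termination_by n - s

-- inner 'while n % s == 0' of Source B ('int(n / s)' on an exact multiple is n / s);
-- '2 ≤ s ∧ 0 < n' in the guard is a totality guard only (always true at the call site).
def stripP (n s : Nat) (e : Int) : Nat × Int :=
  if h : 2 ≤ s ∧ 0 < n ∧ n % s = 0 then stripP (n / s) s (e+1) else (n, e)
termination_by n
decreasing_by exact Nat.div_lt_self h.2.1 (by omega)

-- the three facts factorsB's termination needs (cited in its decreasing_by)
theorem stripP_fst_le (n s : Nat) (e : Int) : (stripP n s e).1 ≤ n := by
  fun_induction stripP with
  | case1 n e h ih => have := Nat.div_le_self n s; omega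
  | case2 n e h => simp

theorem stripP_lt (n s : Nat) (e : Int) (h2 : 2 ≤ s) (h0 : 0 < n) (hd : n % s = 0) :
    (stripP n s e).1 < n := by
  rw [stripP, dif_pos ⟨h2, h0, hd⟩]
  have h1 := stripP_fst_le (n / s) s (e+1)
  have := Nat.div_lt_self h0 (show 1 < s by omega)
  omega

theorem findS_ge (n s : Nat) : s ≤ findS n s := by
  fun_induction findS with
  | case1 s h => omega
  | case2 s h ih => omega

theorem findS_dvd (n s : Nat) : s ≤ n → n % findS n s = 0 := by
  fun_induction findS with
  | case1 s h =>
      intro hs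
      rcases h with h | h
      · exact h
      · have : s = n := by omega
        subst this; exact Nat.mod_self s
  | case2 s h ih =>
      intro _
      exact ih (by omega)

-- recursion of Source B: strip the full exponent of the smallest divisor s ≥ 2, recurse on the
-- cofactor, write the exponent at index s-2 ('rest[s - 2] = e' → List.set; the index is
-- always in range on the executed path, proved as factorsB_len below).
def factorsB (n : Nat) : List Int :=
  if n ≤ 1 then [0]
  else
    if (stripP n (findS n 2) 0).1 = 1 then
      List.replicate (findS n 2 - 2) (0 : Int) ++ [(stripP n (findS n 2) 0).2]
    else
      (factorsB (stripP n (findS n 2) 0).1).set (findS n 2 - 2) (stripP n (findS n 2) 0).2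
termination_by n
decreasing_by
  exact stripP_lt n (findS n 2) 0 (findS_ge n 2) (by omega) (findS_dvd n 2 (by omega))

def factors_List_alt (n : Int) : List Int := if n ≤ 1 then [0] else factorsB n.toNat

-- ===== PRECONDITION & SPEC =====
def Spec_factors_List (n : Int) (out : List Int) : Prop := out = factors_List_alt n
instance (n : Int) (out : List Int) : Decidable (Spec_factors_List n out) := by unfold Spec_factors_List; infer_instance

-- ===== CLAIM (what is proved, stated in full; the proofs are below) =====
def Claim_equal_factors_List : Prop := ∀ (n : Int), Dom_factors_List n → Spec_factors_List n (factors_List n)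

-- ===== LEMMAS AND PROOFS =====

-- Loop invariant: every nontrivial divisor of n is at least j+2 (divisors below i are exhausted).
def NoSmallFac (n j : Nat) : Prop := ∀ d : Nat, 2 ≤ d → d ∣ n → j + 2 ≤ d

-- if n ≥ 2 has no divisor ≤ j+2, its least prime factor — hence n itself — exceeds j+2
theorem noSmallFac_lt (n j : Nat) (hn : 2 ≤ n) (hI : NoSmallFac n j) (hnd : ¬ (j+2) ∣ n) :
    j + 2 < n := by
  have h1 : n ≠ 1 := by omega
  have hp := Nat.minFac_prime h1
  have hd := Nat.minFac_dvd n
  have h2 := hI n.minFac hp.two_le hd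
  have h3 : n.minFac ≠ j + 2 := fun hEq => hnd (hEq ▸ hd)
  have h4 : n.minFac ≤ n := Nat.minFac_le (by omega)
  omega

theorem noSmallFac_of_dvd (n m j : Nat) (hm : m ∣ n) (hI : NoSmallFac n j) : NoSmallFac m j :=
  fun d hd hdm => hI d hd (hdm.trans hm)

theorem stripP_pos (n s : Nat) (e : Int) : 0 < n → 0 < (stripP n s e).1 := by
  fun_induction stripP with
  | case1 n e hg ih =>
      intro h
      exact ih (Nat.div_pos (Nat.le_of_dvd hg.2.1 (Nat.dvd_of_mod_eq_zero hg.2.2)) (by omega))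
  | case2 n e hg => intro h; simpa using h

theorem stripP_dvd (n s : Nat) (e : Int) : (stripP n s e).1 ∣ n := by
  fun_induction stripP with
  | case1 n e hg ih =>
      exact dvd_trans ih (Nat.div_dvd_of_dvd (Nat.dvd_of_mod_eq_zero hg.2.2))
  | case2 n e hg => simp

theorem stripP_not_dvd (n s : Nat) (e : Int) (h2 : 2 ≤ s) : 0 < n →
    ¬ s ∣ (stripP n s e).1 := by
  fun_induction stripP with
  | case1 n e hg ih =>
      intro h
      exact ih (Nat.div_pos (Nat.le_of_dvd hg.2.1 (Nat.dvd_of_mod_eq_zero hg.2.2)) (by omega))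
  | case2 n e hg =>
      intro h hd
      exact hg ⟨h2, h, Nat.mod_eq_zero_of_dvd hd⟩

theorem findS_min (n s d : Nat) (hd : d ∣ n) : s ≤ d → findS n s ≤ d := by
  fun_induction findS with
  | case1 s h => exact fun hsd => hsd
  | case2 s h ih =>
      intro hsd
      have hne : d ≠ s := by
        rintro rfl
        exact h (Or.inl (Nat.mod_eq_zero_of_dvd hd))
      exact ih (by omega)

-- smallest-prime-factor bound from the no-small-factor invariant
theorem spf_ge (n j : Nat) (hn : 2 ≤ n) (hI : NoSmallFac n j) : j + 2 ≤ findS n 2 :=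
  hI _ (findS_ge n 2) (Nat.dvd_of_mod_eq_zero (findS_dvd n 2 (by omega)))

-- the cofactor after stripping s = findS n 2 has no divisor ≤ s
theorem cofactor_noSmallFac (n : Nat) (hn : 2 ≤ n) :
    NoSmallFac (stripP n (findS n 2) 0).1 (findS n 2 - 1) := by
  intro d hd hdm
  have hs2 : 2 ≤ findS n 2 := findS_ge n 2
  have hdn : d ∣ n := hdm.trans (stripP_dvd n (findS n 2) 0)
  have h1 : findS n 2 ≤ d := findS_min n 2 d hdn (by omega)
  have hnd : ¬ (findS n 2) ∣ (stripP n (findS n 2) 0).1 :=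
    stripP_not_dvd n (findS n 2) 0 hs2 (by omega)
  have h2 : d ≠ findS n 2 := by
    rintro rfl
    exact hnd hdm
  omega

-- factorsB is long enough that index (findS n 2) - 2 is always written in range
theorem factorsB_len : ∀ n, 2 ≤ n → findS n 2 - 1 ≤ (factorsB n).length := by
  intro n
  induction n using Nat.strong_induction_on with
  | _ n IH =>
    intro hn
    have hs2 : 2 ≤ findS n 2 := findS_ge n 2
    rw [factorsB, if_neg (by omega)]
    by_cases h1 : (stripP n (findS n 2) 0).1 = 1
    · rw [if_pos h1]
      simp
      omega
    · rw [if_neg h1]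
      have hm1 : 0 < (stripP n (findS n 2) 0).1 := stripP_pos n (findS n 2) 0 (by omega)
      have hm2 : 2 ≤ (stripP n (findS n 2) 0).1 := by omega
      have hlt : (stripP n (findS n 2) 0).1 < n :=
        stripP_lt n (findS n 2) 0 hs2 (by omega) (findS_dvd n 2 (by omega))
      have hI := cofactor_noSmallFac n hn
      have hsm : findS n 2 + 1 ≤ findS (stripP n (findS n 2) 0).1 2 := by
        have := spf_ge (stripP n (findS n 2) 0).1 (findS n 2 - 1) hm2 hI
        omega
      have := IH _ hlt hm2
      rw [List.length_set]
      omega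

-- every entry of factorsB n below index (findS n 2) - 2 is 0
theorem factorsB_entry : ∀ n, 2 ≤ n → ∀ i : Nat, i + 2 < findS n 2 →
    (factorsB n)[i]? = some 0 := by
  intro n
  induction n using Nat.strong_induction_on with
  | _ n IH =>
    intro hn i hi
    have hs2 : 2 ≤ findS n 2 := findS_ge n 2
    rw [factorsB, if_neg (by omega)]
    by_cases h1 : (stripP n (findS n 2) 0).1 = 1
    · rw [if_pos h1]
      rw [List.getElem?_append_left (by simp; omega)]
      simp [List.getElem?_replicate]
      omega
    · rw [if_neg h1]
      have hm1 : 0 < (stripP n (findS n 2) 0).1 := stripP_pos n (findS n 2) 0 (by omega)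
      have hm2 : 2 ≤ (stripP n (findS n 2) 0).1 := by omega
      have hlt : (stripP n (findS n 2) 0).1 < n :=
        stripP_lt n (findS n 2) 0 hs2 (by omega) (findS_dvd n 2 (by omega))
      have hsm : findS n 2 + 1 ≤ findS (stripP n (findS n 2) 0).1 2 := by
        have := spf_ge (stripP n (findS n 2) 0).1 (findS n 2 - 1) hm2 (cofactor_noSmallFac n hn)
        omega
      rw [List.getElem?_set_ne (by omega)]
      exact IH _ hlt hm2 i (by omega)

-- factorsLoopA only appends to facts
theorem loopA_prepend (n j : Nat) (r : Int) (f g : List Int) :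
    factorsLoopA n j r (g ++ f) = g ++ factorsLoopA n j r f := by
  fun_induction factorsLoopA n j r f generalizing g with
  | case1 n j r f h => simp [factorsLoopA, h]
  | case2 n j r f h1 h2 ih =>
      conv_lhs => rw [factorsLoopA]
      simp only [if_neg h1, if_pos h2]
      exact ih g
  | case3 n j r f h1 h2 h3 ih =>
      conv_lhs => rw [factorsLoopA]
      simp only [if_neg h1, if_neg h2, if_pos h3]
      rw [show g ++ f ++ [r] = g ++ (f ++ [r]) by simp, ih]
  | case4 n j r f h1 h2 h3 => simp [factorsLoopA, h1, h2, h3]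

-- A's loop in terms of a full strip of the current divisor
theorem loopA_strip : ∀ n, 2 ≤ n → ∀ (j : Nat) (r : Int), NoSmallFac n j →
    factorsLoopA n j r [] =
      (if (stripP n (j+2) r).1 ≤ 1 then [(stripP n (j+2) r).2]
       else (stripP n (j+2) r).2 :: factorsLoopA (stripP n (j+2) r).1 (j+1) 0 []) := by
  intro n
  induction n using Nat.strong_induction_on with
  | _ n IH =>
    intro hn j r hI
    by_cases hd : n % (j+2) = 0
    · have hdvd : (j+2) ∣ n := Nat.dvd_of_mod_eq_zero hd
      have hq : n / (j+2) < n := Nat.div_lt_self (by omega) (by omega)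
      have hpos : 1 ≤ n / (j+2) := Nat.div_pos (Nat.le_of_dvd (by omega) hdvd) (by omega)
      conv_lhs => rw [factorsLoopA]
      rw [if_neg (by omega), if_pos hd]
      rw [show stripP n (j+2) r = stripP (n / (j+2)) (j+2) (r+1) by
        rw [stripP, dif_pos ⟨by omega, by omega, hd⟩]]
      by_cases h1 : n / (j+2) ≤ 1
      · have he : n / (j+2) = 1 := by omega
        rw [he]
        rw [show stripP 1 (j+2) (r+1) = (1, r+1) by
          rw [stripP, dif_neg (by rintro ⟨-, -, h2⟩; rw [Nat.mod_eq_of_lt (by omega)] at h2; omega)]]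
        rw [factorsLoopA]
        simp
      · exact IH _ hq (by omega) j (r+1) (noSmallFac_of_dvd n _ j (Nat.div_dvd_of_dvd hdvd) hI)
    · have hnd : ¬ (j+2) ∣ n := fun h => hd (Nat.mod_eq_zero_of_dvd h)
      have hlt := noSmallFac_lt n j hn hI hnd
      conv_lhs => rw [factorsLoopA]
      rw [if_neg (by omega), if_neg hd, if_pos hlt]
      rw [show stripP n (j+2) r = (n, r) by
        rw [stripP, dif_neg (by rintro ⟨-, -, h⟩; exact hd h)]]
      rw [if_neg (by omega : ¬ (n, r).1 ≤ 1)]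
      have := loopA_prepend n (j+1) 0 [] [r]
      simpa using this

-- the set written at index s-2 is unchanged below s-2 when dropped past it
theorem drop_set_succ (l : List Int) (i : Nat) (a : Int) :
    (l.set i a).drop (i+1) = l.drop (i+1) := by
  apply List.ext_getElem?
  intro k
  rw [List.getElem?_drop, List.getElem?_drop, List.getElem?_set_ne (by omega)]

-- Main lemma: from state (n, j, reps=0, facts=[]) A's loop produces exactly the suffix of
-- factorsB n from index j, given that n has no divisor below j+2.
theorem AeqB : ∀ n, 2 ≤ n → ∀ j, NoSmallFac n j →
    factorsLoopA n j 0 [] = (factorsB n).drop j := by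
  intro n
  induction n using Nat.strong_induction_on with
  | _ n IH =>
    intro hn
    have hs2 : 2 ≤ findS n 2 := findS_ge n 2
    have hdn : n % findS n 2 = 0 := findS_dvd n 2 (by omega)
    suffices h : ∀ k j, NoSmallFac n j → findS n 2 - (j+2) = k →
        factorsLoopA n j 0 [] = (factorsB n).drop j by
      intro j hI
      exact h _ j hI rfl
    intro k
    induction k with
    | zero =>
      intro j hI hk
      have hsj : j + 2 = findS n 2 := by have := spf_ge n j hn hI; omega
      rw [loopA_strip n hn j 0 hI, hsj]
      have hm1 : 0 < (stripP n (findS n 2) 0).1 := stripP_pos n (findS n 2) 0 (by omega)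
      conv_rhs => rw [factorsB, if_neg (by omega)]
      by_cases h1 : (stripP n (findS n 2) 0).1 = 1
      · rw [if_pos (by omega), if_pos h1]
        rw [show j = (List.replicate (findS n 2 - 2) (0:Int)).length by simp; omega]
        rw [List.drop_left]
      · rw [if_neg (by omega), if_neg h1]
        have hm2 : 2 ≤ (stripP n (findS n 2) 0).1 := by omega
        have hlt : (stripP n (findS n 2) 0).1 < n :=
          stripP_lt n (findS n 2) 0 hs2 (by omega) hdn
        have hIm : NoSmallFac (stripP n (findS n 2) 0).1 (j+1) := by
          have := cofactor_noSmallFac n hn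
          intro d h2d hd
          have := this d h2d hd
          omega
        rw [show findS n 2 - 2 = j by omega]
        have hlen : j < ((factorsB (stripP n (findS n 2) 0).1).set j
            (stripP n (findS n 2) 0).2).length := by
          rw [List.length_set]
          have := factorsB_len (stripP n (findS n 2) 0).1 hm2
          have := spf_ge (stripP n (findS n 2) 0).1 (findS n 2 - 1) hm2 (cofactor_noSmallFac n hn)
          omega
        rw [List.drop_eq_getElem_cons hlen]
        rw [List.getElem_set_self (by simpa using hlen)]
        rw [drop_set_succ]
        rw [IH _ hlt hm2 (j+1) hIm]
    | succ k ihk =>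
      intro j hI hk
      have hsj : j + 2 < findS n 2 := by have := spf_ge n j hn hI; omega
      have hd : n % (j+2) ≠ 0 := by
        intro h
        have := findS_min n 2 (j+2) (Nat.dvd_of_mod_eq_zero h) (by omega)
        omega
      have hlt : j + 2 < n := noSmallFac_lt n j hn hI (fun h => hd (Nat.mod_eq_zero_of_dvd h))
      conv_lhs => rw [factorsLoopA]
      rw [if_neg (by omega), if_neg hd, if_pos hlt]
      have hIm : NoSmallFac n (j+1) := by
        intro d h2d hdd
        have h1 := findS_min n 2 d hdd (by omega)
        omega
      have hstep : factorsLoopA n (j+1) 0 [] = (factorsB n).drop (j+1) :=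
        ihk (j+1) hIm (by omega)
      have hpre := loopA_prepend n (j+1) 0 [] [(0:Int)]
      rw [show ([] : List Int) ++ [(0:Int)] = [(0:Int)] ++ [] by simp, hpre, hstep]
      have hent := factorsB_entry n hn j (by omega)
      have hjlen : j < (factorsB n).length := (List.getElem?_eq_some_iff.mp hent).1
      rw [List.drop_eq_getElem_cons hjlen]
      have : (factorsB n)[j] = 0 := by
        have := (List.getElem?_eq_some_iff.mp hent).2
        simpa using this
      rw [this]
      rfl

theorem factors_List_eq_alt (n : Int) : factors_List n = factors_List_alt n := by
  by_cases hn : n ≤ 1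
  · have hm : n.toNat ≤ 1 := by omega
    rw [factors_List, factors_List_alt, if_pos hn, factorsLoopA, if_pos hm]
    rfl
  · have hm : 2 ≤ n.toNat := by omega
    rw [factors_List, factors_List_alt, if_neg hn]
    have h := AeqB n.toNat hm 0 (fun d hd _ => by omega)
    simpa using h

-- ===== VERDICT (by name: the statement is the Claim_ definition above) =====
theorem factors_List_spec : Claim_equal_factors_List := by
  intro n _
  unfold Spec_factors_List
  exact factors_List_eq_alt n
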